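-- pv_equiv track=rewrite | github.com/TheMarstonConnell/cynamic | src/translator.py | getCharLit
-- ===== SOURCE A (Python) =====
-- def getCharLit(text):
--     token = ""
--     lit = False
--
--     for i in text:
--
--
--         if(i == "'"):
--             lit = not lit
--             token = token + "'"
--         elif(not lit):
--             return text[len(token):], token
--         else:
--             token = token + i
--
--
--
--     return text, ""
-- ===== SOURCE B (Python) =====
-- def getCharLit(text):
--     p, n = 0, len(text)
--     while p < n and text[p] == "'":
--         q = text.find("'", p + 1)
--         if q == -1:
--             return text, ""
--         p = q + 1
--     if p < n:
--         return text[p:], text[:p]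
--     return text, ""
-- ===== Notes on version B (the rewrite author's own statement) =====
-- stated objective: simpler
-- what changed: Replaces A's character-by-character parity state machine with string concatenation by a boundary scan that jumps from an opening quote to its closing quote via str.find and then slices the input once at the group boundary.
import Mathlib
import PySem

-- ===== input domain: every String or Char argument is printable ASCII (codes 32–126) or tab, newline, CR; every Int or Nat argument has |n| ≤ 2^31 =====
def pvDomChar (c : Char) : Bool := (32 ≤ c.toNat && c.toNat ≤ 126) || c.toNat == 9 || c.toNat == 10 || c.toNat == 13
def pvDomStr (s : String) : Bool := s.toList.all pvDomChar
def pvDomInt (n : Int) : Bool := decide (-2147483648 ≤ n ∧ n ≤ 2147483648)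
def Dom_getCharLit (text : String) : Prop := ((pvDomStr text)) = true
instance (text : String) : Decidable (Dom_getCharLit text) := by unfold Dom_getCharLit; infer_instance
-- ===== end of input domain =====

-- B replaces A's char-by-char parity state machine by skipping from quote to
-- matching quote with str.find, then slicing once at the group boundary (objective: simpler).

-- ===== PORT A =====
-- A's loop: state (token, lit); early return becomes a terminating branch.
def pvA_loop (text : String) (rest token : List Char) (lit : Bool) : String × String :=
  match rest with
  | [] => (text, "")
  | c :: cs =>
    if c = '\'' then
      pvA_loop text cs (token ++ ['\'']) (!lit)
    else if lit = false then
      (PySem.Str.slice text (some ((token.length : Int))) none, String.ofList token)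
    else
      pvA_loop text cs (token ++ [c]) lit

def getCharLit (text : String) : String × String :=
  pvA_loop text text.toList [] false

-- ===== PORT B =====
-- B's while loop: p advances past one complete quoted group per iteration.
-- 'p < n and text[p] == "'"' is encoded as text.toList[p]? = some '\''.
def pvB_loop (text : String) (p : Nat) : String × String :=
  if hc : text.toList[p]? = some '\'' then
    let q := PySem.Str.findFrom text "'" ((p : Int) + 1) none
    if hq : q = -1 then (text, "")
    else pvB_loop text (q.toNat + 1)
  else if p < text.toList.length then
    (PySem.Str.slice text (some (p : Int)) none, PySem.Str.slice text none (some (p : Int)))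
  else (text, "")
termination_by text.toList.length - p
decreasing_by
  have hp : p < text.toList.length := by
    exact (List.getElem?_eq_some_iff.mp hc).1
  have hk : p + 1 ≤ text.toList.length := hp
  have hspec := PySem.Chars.findFrom_natCast_spec text.toList "'".toList (p + 1) hk
    (by
      simpa [PySem.Str.findFrom_eq, Nat.cast_add] using hq)
  have h1 : (p : Int) + 1 ≤ q := by
    have := hspec.1
    simpa [q, PySem.Str.findFrom_eq, Nat.cast_add] using this
  have : p + 1 ≤ q.toNat := by omega
  omega

def getCharLit_alt (text : String) : String × String :=
  pvB_loop text 0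

-- ===== PRECONDITION & SPEC =====
def Spec_getCharLit (text : String) (out : String × String) : Prop := out = getCharLit_alt text
instance (text : String) (out : String × String) : Decidable (Spec_getCharLit text out) := by unfold Spec_getCharLit; infer_instance

-- ===== CLAIM (what is proved, stated in full; the proofs are below) =====
def Claim_equal_getCharLit : Prop := ∀ (text : String), Dom_getCharLit text → Spec_getCharLit text (getCharLit text)

-- ===== LEMMAS AND PROOFS =====

-- [c] is a prefix of l iff l starts with c
lemma pv_singleton_prefix (c : Char) (l : List Char) : [c] <+: l ↔ l.head? = some c := by
  cases l with
  | nil => simp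
  | cons x xs => simp [List.cons_prefix_cons, eq_comm]

-- find of a single char points at its first occurrence
lemma pv_find_first (c : Char) (m r : List Char) (hm : c ∉ m) :
    PySem.Chars.find (m ++ c :: r) [c] = (m.length : Int) := by
  set s := m ++ c :: r with hs
  have hinf : [c] <:+: s := by
    rw [List.singleton_infix_iff]; simp [hs]
  have hne : PySem.Chars.find s [c] ≠ -1 := (PySem.Chars.find_ne_neg_one_iff s [c]).mpr hinf
  have hnn : 0 ≤ PySem.Chars.find s [c] := by
    have := PySem.Chars.neg_one_le_find s [c]
    omega
  obtain ⟨hpre, hmin⟩ := PySem.Chars.find_spec hnn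
  set j := (PySem.Chars.find s [c]).toNat with hj
  have hmlen : [c] <+: s.drop m.length := by
    rw [pv_singleton_prefix]
    simp [hs]
  have hle : j ≤ m.length := by
    by_contra h
    exact hmin m.length (by omega) hmlen
  have hcj : s.head?.isSome → True := fun _ => trivial
  have hjc : s[j]? = some c := by
    have := (pv_singleton_prefix c (s.drop j)).mp hpre
    simpa [List.head?_drop] using this
  have hjm : j = m.length := by
    rcases Nat.lt_or_ge j m.length with hlt | hge
    · exfalso
      have : s[j]? = m[j]? := by
        rw [hs, List.getElem?_append_left hlt]
      rw [this] at hjc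
      exact hm (List.mem_of_getElem? hjc)
    · omega
  omega

-- A's inner loop with lit = true on a quote-free list runs off the end
lemma pvA_noquote (text : String) (cs tok : List Char) (h : '\'' ∉ cs) :
    pvA_loop text cs tok true = (text, "") := by
  induction cs generalizing tok with
  | nil => simp [pvA_loop]
  | cons c cs ih =>
    have hc : c ≠ '\'' := by intro hh; exact h (by simp [hh])
    simp only [pvA_loop, if_neg hc]
    simp only [show (true = false) = False by simp, if_neg (by simp : ¬ False)]
    exact ih (tok ++ [c]) (fun hx => h (List.mem_cons_of_mem _ hx))

-- A's inner loop with lit = true consumes up to and including the next quote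
lemma pvA_skip (text : String) (m r tok : List Char) (hm : '\'' ∉ m) :
    pvA_loop text (m ++ '\'' :: r) tok true = pvA_loop text r (tok ++ m ++ ['\'']) false := by
  induction m generalizing tok with
  | nil => simp [pvA_loop]
  | cons a m ih =>
    have ha : a ≠ '\'' := by intro hh; exact hm (by simp [hh])
    simp only [List.cons_append, pvA_loop, if_neg ha]
    simp only [show (true = false) = False by simp, if_neg (by simp : ¬ False)]
    rw [ih (tok ++ [a]) (fun hx => hm (List.mem_cons_of_mem _ hx))]
    simp

-- the main invariant: at a group boundary both loops agree
lemma pv_main (text : String) : ∀ n (pre rest : List Char),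
    rest.length = n → text.toList = pre ++ rest →
    pvA_loop text rest pre false = pvB_loop text pre.length := by
  intro n
  induction n using Nat.strong_induction_on with
  | _ n ih =>
    intro pre rest hn h
    match rest with
    | [] =>
      rw [pvB_loop]
      have hlen : text.toList.length = pre.length := by simp [h]
      simp [pvA_loop, hlen]
    | c :: cs =>
      have hgetp : text.toList[pre.length]? = some c := by
        rw [h]
        simp
      by_cases hc : c = '\''
      · subst hc
        -- B takes the quote branch
        rw [pvB_loop]
        rw [dif_pos hgetp]
        have hp : pre.length < text.toList.length := (List.getElem?_eq_some_iff.mp hgetp).1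
        have hk : pre.length + 1 ≤ text.toList.length := hp
        have hdrop : text.toList.drop (pre.length + 1) = cs := by
          rw [h, show pre ++ '\'' :: cs = (pre ++ ['\'']) ++ cs by simp,
            show pre.length + 1 = (pre ++ ['\'']).length by simp, List.drop_left]
        have hff : PySem.Str.findFrom text "'" ((pre.length : Int) + 1) none
            = if PySem.Chars.find cs ['\''] = -1 then -1
              else ((pre.length : Int) + 1) + PySem.Chars.find cs ['\''] := by
          rw [PySem.Str.findFrom_eq]
          have := PySem.Chars.findFrom_natCast text.toList "'".toList (pre.length + 1) hk
          rw [show (("'" : String).toList) = ['\''] by decide] at this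
          rw [hdrop] at this
          simpa [Nat.cast_add] using this
        -- A steps into the lit = true loop
        have hA : pvA_loop text ('\'' :: cs) pre false
            = pvA_loop text cs (pre ++ ['\'']) true := by
          simp [pvA_loop]
        by_cases hq : '\'' ∈ cs
        · obtain ⟨m, r, hmr, hmfree⟩ := List.eq_append_cons_of_mem hq
          have hfind : PySem.Chars.find cs ['\''] = (m.length : Int) := by
            rw [hmr]; exact pv_find_first '\'' m r hmfree
          have hml : ¬ ((m.length : Int) = -1) := by omega
          have hq' : ¬ (PySem.Str.findFrom text "'" ((pre.length : Int) + 1) none = -1) := by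
            rw [hff, hfind, if_neg hml]
            intro hcon; omega
          rw [dif_neg hq']
          have hqv : (PySem.Str.findFrom text "'" ((pre.length : Int) + 1) none).toNat + 1
              = pre.length + m.length + 2 := by
            rw [hff, hfind, if_neg hml]
            omega
          rw [hqv]
          rw [hA, hmr, pvA_skip text m r (pre ++ ['\'']) hmfree]
          have hpre' : text.toList = (pre ++ ['\''] ++ m ++ ['\'']) ++ r := by
            rw [h, hmr]; simp
          have hlen' : (pre ++ ['\''] ++ m ++ ['\'']).length = pre.length + m.length + 2 := by
            simp; omega
          have := ih r.length (by rw [← hn, hmr]; simp; omega)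
            (pre ++ ['\''] ++ m ++ ['\'']) r rfl hpre'
          rw [hlen'] at this
          exact this
        · have hq' : PySem.Str.findFrom text "'" ((pre.length : Int) + 1) none = -1 := by
            rw [hff]
            have : PySem.Chars.find cs ['\''] = -1 := by
              rw [PySem.Chars.find_eq_neg_one_iff]
              rw [List.singleton_infix_iff]
              exact hq
            simp [this]
          rw [dif_pos hq']
          rw [hA, pvA_noquote text cs (pre ++ ['\'']) hq]
      · -- boundary: both return the split at pre.length
        rw [pvB_loop]
        have hcnq : ¬ (text.toList[pre.length]? = some '\'') := by
          rw [hgetp]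
          intro hcon
          exact hc (Option.some_inj.mp hcon)
        rw [dif_neg hcnq]
        have hp : pre.length < text.toList.length := (List.getElem?_eq_some_iff.mp hgetp).1
        rw [if_pos hp]
        have hA : pvA_loop text (c :: cs) pre false
            = (PySem.Str.slice text (some ((pre.length : Int))) none, String.ofList pre) := by
          simp [pvA_loop, hc]
        rw [hA]
        have hsl : PySem.Str.slice text none (some ((pre.length : Int))) = String.ofList pre := by
          simp [PySem.Str.slice, PySem.Chars.slice_eq_listSlice, PySem.List.slice_to_natCast]
          rw [h]
          simp
        rw [hsl]

-- ===== VERDICT (by name: the statement is the Claim_ definition above) =====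
theorem getCharLit_spec : Claim_equal_getCharLit := by
  unfold Claim_equal_getCharLit
  intro text _
  unfold Spec_getCharLit getCharLit getCharLit_alt
  have := pv_main text text.toList.length [] text.toList rfl (by simp)
  simpa using this
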